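-- pv_equiv track=rewrite | github.com/A-tri-j/QueryBoard | backend/intent_extractor.py | _normalize_group_by_columns
-- ===== SOURCE A (Python) =====
-- def _normalize_group_by_columns(columns: list[str]) -> list[str]:
--     normalized_columns: list[str] = []
--
--     for column in columns:
--         if column not in normalized_columns:
--             normalized_columns.append(column)
--
--     if "age_group" in normalized_columns and "age" in normalized_columns:
--         normalized_columns = [column for column in normalized_columns if column != "age"]
--
--     return normalized_columns[:2]
-- ===== SOURCE B (Python) =====
-- def _normalize_group_by_columns(columns: list[str]) -> list[str]:
--     drop_age = "age_group" in columns and "age" in columns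
--     seen: set[str] = set()
--     result: list[str] = []
--     for column in columns:
--         if drop_age and column == "age":
--             continue
--         if column not in seen:
--             seen.add(column)
--             result.append(column)
--             if len(result) == 2:
--                 break
--     return result
-- ===== Notes on version B (the rewrite author's own statement) =====
-- stated objective: faster
-- what changed: Replaces A's build-full-dedup-list (with O(k) membership scans), then filter, then slice with a single early-terminating pass driven by a precomputed drop_age flag, a hash set for membership, and a break as soon as two columns are collected.
import Mathlib
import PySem

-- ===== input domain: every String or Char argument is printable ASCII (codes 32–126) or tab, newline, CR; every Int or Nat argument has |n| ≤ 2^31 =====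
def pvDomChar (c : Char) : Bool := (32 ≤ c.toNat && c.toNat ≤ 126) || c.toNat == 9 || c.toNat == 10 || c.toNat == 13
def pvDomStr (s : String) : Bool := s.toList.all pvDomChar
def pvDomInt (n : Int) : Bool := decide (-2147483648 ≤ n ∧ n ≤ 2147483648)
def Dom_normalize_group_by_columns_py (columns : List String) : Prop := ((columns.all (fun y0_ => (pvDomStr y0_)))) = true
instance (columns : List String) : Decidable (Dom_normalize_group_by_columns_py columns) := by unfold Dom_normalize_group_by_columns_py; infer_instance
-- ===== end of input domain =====

-- B replaces A's full dedup pass + filter + slice with one early-terminating pass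
-- (precomputed drop_age flag, seen set, break once two columns are collected).


-- ===== PORT A =====
def normalize_group_by_columns_py (columns : List String) : List String :=
  let normalized := columns.foldl
    (fun acc column => if acc.contains column then acc else acc ++ [column]) []
  let normalized :=
    if normalized.contains "age_group" && normalized.contains "age" then
      normalized.filter (fun column => column != "age")
    else normalized
  PySem.List.slice normalized none (some 2)

-- ===== PORT B =====
-- the for-loop of Source B: state (seen, result); 'continue' on a dropped "age", break at two collected
def pvGoB (dropAge : Bool) : PySem.Set String → List String → List String → List String
  | _, res, [] => res
  | seen, res, column :: rest =>
    if dropAge && column == "age" then pvGoB dropAge seen res rest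
    else if PySem.Set.contains seen column then pvGoB dropAge seen res rest
    else
      let res' := res ++ [column]
      if res'.length == 2 then res'
      else pvGoB dropAge (PySem.Set.add seen column) res' rest


def normalize_group_by_columns_py_alt (columns : List String) : List String :=
  let dropAge := columns.contains "age_group" && columns.contains "age"
  pvGoB dropAge PySem.Set.empty [] columns

-- ===== PRECONDITION & SPEC =====
def Spec_normalize_group_by_columns_py (columns : List String) (out : List String) : Prop := out = normalize_group_by_columns_py_alt columns
instance (columns : List String) (out : List String) : Decidable (Spec_normalize_group_by_columns_py columns out) := by unfold Spec_normalize_group_by_columns_py; infer_instance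

-- ===== CLAIM (what is proved, stated in full; the proofs are below) =====
def Claim_equal_normalize_group_by_columns_py : Prop := ∀ (columns : List String), Dom_normalize_group_by_columns_py columns → Spec_normalize_group_by_columns_py columns (normalize_group_by_columns_py columns)

-- ===== LEMMAS AND PROOFS =====
def pvDD (acc : List String) : List String → List String
  | [] => []
  | c :: l => if acc.contains c then pvDD acc l else c :: pvDD (acc ++ [c]) l

theorem pvDD_foldl (l acc : List String) :
    l.foldl (fun acc column => if acc.contains column then acc else acc ++ [column]) acc
      = acc ++ pvDD acc l := by
  induction l generalizing acc with
  | nil => simp [pvDD]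
  | cons c l ih =>
    rw [List.foldl_cons]
    by_cases h : acc.contains c
    · rw [if_pos h, pvDD, if_pos h, ih]
    · rw [if_neg h, pvDD, if_neg h, ih]
      simp

theorem pvDD_mem (l : List String) (acc : List String) (c : String) :
    c ∈ acc ++ pvDD acc l ↔ c ∈ acc ++ l := by
  induction l generalizing acc with
  | nil => simp [pvDD]
  | cons x l ih =>
    rw [pvDD]
    by_cases h : acc.contains x
    · rw [if_pos h, ih]
      have hx : x ∈ acc := by simpa using h
      simp only [List.mem_append, List.mem_cons]
      constructor
      · rintro (h1 | h1) <;> simp [h1]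
      · rintro (h1 | h1 | h1) <;> simp_all
    · rw [if_neg h]
      have := ih (acc ++ [x])
      simp only [List.mem_append, List.mem_cons, List.mem_singleton] at *
      tauto

theorem contains_filter (acc : List String) (p : String → Bool) (c : String) (hp : p c = true) :
    (acc.filter p).contains c = acc.contains c := by
  by_cases h : c ∈ acc
  · have : c ∈ acc.filter p := List.mem_filter.mpr ⟨h, hp⟩
    simp [List.contains_iff_mem, h, this]
  · have : c ∉ acc.filter p := fun hc => h (List.mem_filter.mp hc).1
    simp [List.contains_iff_mem, h, this]

theorem pvDD_cons (acc : List String) (c : String) (l : List String) :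
    pvDD acc (c :: l) = if acc.contains c then pvDD acc l else c :: pvDD (acc ++ [c]) l := rfl

theorem pvDD_filter (l acc : List String) (p : String → Bool) :
    (pvDD acc l).filter p = pvDD (acc.filter p) (l.filter p) := by
  induction l generalizing acc with
  | nil => simp [pvDD]
  | cons c l ih =>
    by_cases hp : p c = true
    · by_cases h : acc.contains c
      · rw [pvDD_cons, if_pos h, ih, List.filter_cons, if_pos hp, pvDD_cons,
          contains_filter acc p c hp, if_pos h]
      · rw [pvDD_cons, if_neg h, List.filter_cons, if_pos hp, ih (acc ++ [c]),
          List.filter_append, List.filter_cons, if_pos hp, List.filter_nil,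
          List.filter_cons, if_pos hp, pvDD_cons, contains_filter acc p c hp, if_neg h]
    · by_cases h : acc.contains c
      · rw [pvDD_cons, if_pos h, ih, List.filter_cons, if_neg hp]
      · rw [pvDD_cons, if_neg h, List.filter_cons, if_neg hp, ih (acc ++ [c]),
          List.filter_append, List.filter_cons, if_neg hp, List.filter_nil,
          List.append_nil, List.filter_cons, if_neg hp]

theorem pvGoB_false (l : List String) (seen res : List String)
    (hinv : ∀ c, c ∈ seen ↔ c ∈ res) (hlen : res.length < 2) :
    pvGoB false seen res l = (res ++ pvDD res l).take 2 := by
  induction l generalizing seen res with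
  | nil =>
    simp [pvGoB, pvDD, List.take_of_length_le (Nat.le_of_lt hlen)]
  | cons c l ih =>
    rw [pvGoB.eq_def]
    simp only [Bool.false_and, Bool.false_eq_true, if_false, pvDD_cons]
    by_cases h : c ∈ res
    · have h1 : PySem.Set.contains seen c = true := by
        simp [PySem.Set.contains_eq_listContains, List.contains_iff_mem, (hinv c).mpr h]
      have h2 : res.contains c = true := by simpa [List.contains_iff_mem] using h
      simp only [h1, if_true, h2, ih seen res hinv hlen]
    · have h1 : PySem.Set.contains seen c = false := by
        simp only [PySem.Set.contains_eq_listContains, List.contains_iff_mem,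
          Bool.eq_false_iff, ne_eq, Bool.not_eq_true]
        simpa using fun hc => h ((hinv c).mp hc)
      have h2 : res.contains c = false := by
        simpa [List.contains_iff_mem] using h
      simp only [h1, h2, Bool.false_eq_true, if_false]
      have heq : res ++ c :: pvDD (res ++ [c]) l = (res ++ [c]) ++ pvDD (res ++ [c]) l := by
        simp
      by_cases h3 : (res ++ [c]).length = 2
      · rw [if_pos (by simpa using h3), heq, List.take_left' h3]
      · rw [if_neg (by simpa using h3)]
        have hadd : PySem.Set.add seen c = seen ++ [c] := by
          simp only [PySem.Set.add, h1, Bool.false_eq_true, if_false]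
        have hlen2 : (res ++ [c]).length < 2 := by
          simp only [List.length_append, List.length_singleton] at h3 ⊢
          omega
        rw [hadd, ih (seen ++ [c]) (res ++ [c])
          (by intro x; simp only [List.mem_append, List.mem_singleton]; rw [hinv x]) hlen2,
          heq]

theorem pvGoB_true (l : List String) (seen res : List String) :
    pvGoB true seen res l = pvGoB false seen res (l.filter (fun c => c != "age")) := by
  induction l generalizing seen res with
  | nil => simp [pvGoB]
  | cons c l ih =>
    by_cases h : c = "age"
    · subst h
      rw [pvGoB.eq_def]
      simp only [beq_self_eq_true, Bool.and_true, if_pos, List.filter_cons, bne_self_eq_false,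
        Bool.false_eq_true, if_false]
      exact ih seen res
    · have hb : (c == "age") = false := by simpa using h
      have hbne : (c != "age") = true := by simp [bne, hb]
      rw [pvGoB.eq_def, List.filter_cons, if_pos hbne]
      simp only [Bool.true_and, hb, Bool.false_eq_true, if_false]
      rw [pvGoB.eq_def (dropAge := false)]
      simp only [Bool.false_and, Bool.false_eq_true, if_false]
      by_cases h1 : PySem.Set.contains seen c
      · rw [if_pos h1, if_pos h1, ih]
      · rw [if_neg h1, if_neg h1]
        by_cases h2 : ((res ++ [c]).length == 2) = true
        · rw [if_pos h2, if_pos h2]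
        · rw [if_neg h2, if_neg h2, ih]

-- ===== VERDICT (by name: the statement is the Claim_ definition above) =====
theorem normalize_group_by_columns_py_spec : Claim_equal_normalize_group_by_columns_py := by
  intro columns _
  unfold Spec_normalize_group_by_columns_py normalize_group_by_columns_py
    normalize_group_by_columns_py_alt
  simp only [pvDD_foldl, List.nil_append]
  have hmem : ∀ c, (pvDD [] columns).contains c = columns.contains c := by
    intro c
    rw [Bool.eq_iff_iff, List.contains_iff_mem, List.contains_iff_mem]
    simpa using pvDD_mem columns [] c
  have hslice : ∀ xs : List String, PySem.List.slice xs none (some 2) = xs.take 2 := by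
    intro xs
    have h2 : ((2:Nat) : Int) = (2:Int) := by norm_num
    rw [← h2, PySem.List.slice_to_natCast]
  rw [hmem, hmem]
  by_cases hd : (columns.contains "age_group" && columns.contains "age") = true
  · simp only [hd, if_true]
    rw [pvGoB_true, pvGoB_false _ _ _ (fun c => by simp [PySem.Set.empty]) (by simp), hslice,
      pvDD_filter]
    simp
  · rw [Bool.not_eq_true] at hd
    simp only [hd, Bool.false_eq_true, if_false]
    rw [pvGoB_false _ _ _ (fun c => by simp [PySem.Set.empty]) (by simp), hslice]
    rfl
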